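-- pv_equiv track=rewrite | github.com/darekpe79/work_space | definicje.py | list_of_dict_from_list_of_lists2
-- ===== SOURCE A (Python) =====
-- def list_of_dict_from_list_of_lists2 (records):
--     recs2table = []
--     for record in records:
--         rec_dict = {}
--         for field in record:
--             if field[1:4] in rec_dict.keys():
--                 rec_dict[field[1:4]].append(field[6:].strip())
--             else:
--                 rec_dict[field[1:4]] = [field[6:].strip()]
--         recs2table.append(rec_dict)
--     return recs2table
-- ===== SOURCE B (Python) =====
-- def _row2(record):
--     keys = list(dict.fromkeys(field[1:4] for field in record))
--     return {k: [field[6:].strip() for field in record if field[1:4] == k] for k in keys}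
--
--
-- def list_of_dict_from_list_of_lists2(records):
--     return [_row2(record) for record in records]
-- ===== Notes on version B (the rewrite author's own statement) =====
-- stated objective: alternative
-- what changed: Replaces A's single-pass mutable-dict grouping (membership test + append-or-insert per field) with a two-pass per-record decomposition: an ordered dedup of the key slices via dict.fromkeys, then one filtering comprehension per distinct key.
import Mathlib
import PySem

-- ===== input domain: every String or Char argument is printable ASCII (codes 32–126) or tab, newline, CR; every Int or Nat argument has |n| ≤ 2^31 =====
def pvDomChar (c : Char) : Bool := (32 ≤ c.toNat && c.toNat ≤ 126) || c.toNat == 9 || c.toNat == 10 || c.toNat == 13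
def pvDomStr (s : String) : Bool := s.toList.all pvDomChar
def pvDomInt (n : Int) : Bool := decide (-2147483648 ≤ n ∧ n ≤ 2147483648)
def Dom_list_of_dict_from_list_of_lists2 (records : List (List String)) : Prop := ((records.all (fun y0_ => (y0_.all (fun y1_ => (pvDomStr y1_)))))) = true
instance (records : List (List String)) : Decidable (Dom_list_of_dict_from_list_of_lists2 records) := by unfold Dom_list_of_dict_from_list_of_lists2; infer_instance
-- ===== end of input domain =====

-- B replaces A's single-pass mutable-dict grouping by a two-pass decomposition per record
-- (ordered dedup of key slices, then a filter per key); alternative structure, same cost class.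

-- ===== PORT A =====
def list_of_dict_from_list_of_lists2 (records : List (List String)) : List (List (String × List String)) :=
  records.foldl (fun recs2table record =>
    recs2table ++ [(record.foldl (fun rec_dict field =>
      if rec_dict.contains (PySem.Str.slice field (some 1) (some 4)) then
        rec_dict.modify (PySem.Str.slice field (some 1) (some 4)) []
          (· ++ [PySem.Str.strip (PySem.Str.slice field (some 6) none)])
      else
        rec_dict.insert (PySem.Str.slice field (some 1) (some 4))
          [PySem.Str.strip (PySem.Str.slice field (some 6) none)])
      PySem.Dict.empty).items]) []

-- ===== PORT B =====
def pvKey (field : String) : String := PySem.Str.slice field (some 1) (some 4)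

def pvVal (field : String) : String := PySem.Str.strip (PySem.Str.slice field (some 6) none)

def pvRow (record : List String) : List (String × List String) :=
  (PySem.List.dedup (record.map pvKey)).map
    (fun k => (k, (record.filter (fun field => pvKey field == k)).map pvVal))

def list_of_dict_from_list_of_lists2_alt (records : List (List String)) : List (List (String × List String)) :=
  records.map pvRow

-- ===== PRECONDITION & SPEC =====
def Spec_list_of_dict_from_list_of_lists2 (records : List (List String)) (out : List (List (String × List String))) : Prop := out = list_of_dict_from_list_of_lists2_alt records
instance (records : List (List String)) (out : List (List (String × List String))) : Decidable (Spec_list_of_dict_from_list_of_lists2 records out) := by unfold Spec_list_of_dict_from_list_of_lists2; infer_instance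

-- ===== CLAIM (what is proved, stated in full; the proofs are below) =====
def Claim_equal_list_of_dict_from_list_of_lists2 : Prop := ∀ (records : List (List String)), Dom_list_of_dict_from_list_of_lists2 records → Spec_list_of_dict_from_list_of_lists2 records (list_of_dict_from_list_of_lists2 records)

-- ===== LEMMAS AND PROOFS =====

theorem pv_modify_not_contains {κ ν : Type} [BEq κ] [LawfulBEq κ] (d : PySem.Dict κ ν) (k : κ)
    (d0 : ν) (f : ν → ν) (h : d.contains k = false) : d.modify k d0 f = d.insert k (f d0) := by
  have h2 : d.getD k d0 = d0 := PySem.Dict.getD_of_not_contains d d0 h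
  simp [PySem.Dict.modify, PySem.Dict.insert, h, h2]

-- A's branchy step is one Dict.modify
theorem pv_stepA_eq (d : PySem.Dict String (List String)) (field : String) :
    (if d.contains (PySem.Str.slice field (some 1) (some 4)) then
        d.modify (PySem.Str.slice field (some 1) (some 4)) []
          (· ++ [PySem.Str.strip (PySem.Str.slice field (some 6) none)])
      else
        d.insert (PySem.Str.slice field (some 1) (some 4))
          [PySem.Str.strip (PySem.Str.slice field (some 6) none)])
    = d.modify (pvKey field) [] (· ++ [pvVal field]) := by
  by_cases h : d.contains (PySem.Str.slice field (some 1) (some 4)) = true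
  · simp [h, pvKey, pvVal]
  · simp only [Bool.not_eq_true] at h
    simp [h, pv_modify_not_contains _ _ _ _ h, pvKey, pvVal]

-- the inner dict of A, per record, as a fold over (key, value) pairs
theorem pv_inner_eq (record : List String) :
    record.foldl (fun rec_dict field =>
      if rec_dict.contains (PySem.Str.slice field (some 1) (some 4)) then
        rec_dict.modify (PySem.Str.slice field (some 1) (some 4)) []
          (· ++ [PySem.Str.strip (PySem.Str.slice field (some 6) none)])
      else
        rec_dict.insert (PySem.Str.slice field (some 1) (some 4))
          [PySem.Str.strip (PySem.Str.slice field (some 6) none)])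
      PySem.Dict.empty
    = (record.map (fun f => (pvKey f, pvVal f))).foldl
        (fun d p => d.modify p.1 [] (· ++ [p.2])) PySem.Dict.empty := by
  rw [List.foldl_map]
  apply PySem.List.foldl_congr_mem
  exact fun d f _ => pv_stepA_eq d f

theorem pv_row_eq (record : List String) :
    (record.foldl (fun rec_dict field =>
      if rec_dict.contains (PySem.Str.slice field (some 1) (some 4)) then
        rec_dict.modify (PySem.Str.slice field (some 1) (some 4)) []
          (· ++ [PySem.Str.strip (PySem.Str.slice field (some 6) none)])
      else
        rec_dict.insert (PySem.Str.slice field (some 1) (some 4))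
          [PySem.Str.strip (PySem.Str.slice field (some 6) none)])
      PySem.Dict.empty).items = pvRow record := by
  rw [pv_inner_eq]
  set pairs := record.map (fun f => (pvKey f, pvVal f)) with hpairs
  set d := pairs.foldl (fun d p => d.modify p.1 [] (· ++ [p.2])) PySem.Dict.empty with hd
  have hnd : d.keys.Nodup :=
    PySem.Dict.nodup_keys_foldl_modify_key pairs Prod.fst [] (fun _ _ => (· ++ [_])) PySem.Dict.empty PySem.Dict.nodup_keys_empty
  have hkeys : d.keys = PySem.List.dedup (record.map pvKey) := by
    rw [hd, PySem.Dict.keys_foldl_modify_key]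
    simp only [hpairs, PySem.Set.update, PySem.Set.ofList, PySem.List.dedup,
      PySem.Dict.keys_empty, List.map_map]
    rfl
  have hget : ∀ k, d.getD k [] = (pairs.filter (fun p => p.1 == k)).map (·.2) := by
    intro k
    rw [hd, PySem.Dict.getD_foldl_modify_append]
    simp
  rw [PySem.Dict.items_eq_map_keys d hnd [], hkeys]
  unfold pvRow
  apply List.map_congr_left
  intro k _
  rw [hget k, hpairs, List.filter_map, List.map_map]
  rfl

theorem pv_foldl_append {α β : Type} (g : α → β) (l : List α) (acc : List β) :
    l.foldl (fun a x => a ++ [g x]) acc = acc ++ l.map g := by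
  induction l generalizing acc with
  | nil => simp
  | cons x xs ih => simp [ih]

-- ===== VERDICT (by name: the statement is the Claim_ definition above) =====
theorem list_of_dict_from_list_of_lists2_spec : Claim_equal_list_of_dict_from_list_of_lists2 := by
  intro records _
  unfold Spec_list_of_dict_from_list_of_lists2 list_of_dict_from_list_of_lists2 list_of_dict_from_list_of_lists2_alt
  rw [pv_foldl_append]
  simp only [List.nil_append]
  exact List.map_congr_left (fun r _ => pv_row_eq r)
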